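-- pv_equiv track=rewrite | github.com/almala333/EEBE-problemas-Jutge-Q1-24-25 | 07_Diccionarios/X47293_GreatNoise.py | clasificar_duracion
-- ===== SOURCE A (Python) =====
-- def clasificar_duracion(lista_reproduccion):
--     '''
--     Parametres
--     ----------
--     lista_reproduccion: list
--         Llista de cançons, on cada cançó és una llista que conté el títol, l'autor, l'àlbum i la durada en segons.
--
--     Retorna
--     -------
--     dict
--         Un diccionari que classifica les cançons en tres categories segons la seva durada:
--         'a' per a cançons de menys de 3 minuts,
--         'b' per a cançons entre 3 i 5 minuts,
--         'c' per a cançons de més de 5 minuts.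
--
--     Tests públics
--     -------------
--     >>> lista = [["Higher", "Creed", "Greatest Hits", 316],
--     ...          ["Basket Case", "Green Day", "Dookie", 182],
--     ...          ["Glycerine", "Bush", "Sixteen Stone", 266],
--     ...          ["Congregation", "Foo Fighters", "Sonic Highways", 312],
--     ...          ["Blackbird", "Alter Bridge", "Blackbird", 478],
--     ...          ["Basket Case", "Green Day", "God's FB", 182],
--     ...          ["Fuck You", "Bad Religion", "True North", 134],
--     ...          ["Higher", "Creed", "Human Clay", 316]]
--
--     >>> clasificacion = clasificar_duracion(lista)
--     >>> clasificacion == {'a': 1, 'b': 3, 'c': 4}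
--     True
--
--     Tests privats
--     -------------
--     >>> lista_test = [["Cançó Curta", "Artista1", "Àlbum1", 120],
--     ...               ["Cançó Mitjana", "Artista2", "Àlbum2", 240],
--     ...               ["Cançó Llarga", "Artista3", "Àlbum3", 360]]
--     >>> clasificar_duracion(lista_test)
--     {'a': 1, 'b': 1, 'c': 1}
--
--     >>> lista_buit = []
--     >>> clasificar_duracion(lista_buit)
--     {'a': 0, 'b': 0, 'c': 0}
--
--     >>> lista_una_canco = [["Sol", "Artista", "Àlbum", 150]]
--     >>> clasificar_duracion(lista_una_canco)
--     {'a': 1, 'b': 0, 'c': 0}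
--     '''
--
--
--
--     duration_count = {'a': 0, 'b': 0, 'c': 0}
--     for song in lista_reproduccion:
--         duration = song[3]
--         if duration < 180:
--             duration_count['a'] += 1
--         elif 180 <= duration <= 300:
--             duration_count['b'] += 1
--         else:
--             duration_count['c'] += 1
--     return duration_count
-- ===== SOURCE B (Python) =====
-- import bisect
--
-- def clasificar_duracion(lista_reproduccion):
--     ds = sorted(song[3] for song in lista_reproduccion)
--     a = bisect.bisect_left(ds, 180)
--     upto300 = bisect.bisect_right(ds, 300)
--     return {'a': a, 'b': upto300 - a, 'c': len(ds) - upto300}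
-- ===== Notes on version B (the rewrite author's own statement) =====
-- stated objective: alternative
-- what changed: Replaces the per-song three-way branch updating a dict with a sort of the durations followed by two binary-search boundary lookups (bisect_left 180 / bisect_right 300); the bucket sizes are differences of those indices.
import Mathlib
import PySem

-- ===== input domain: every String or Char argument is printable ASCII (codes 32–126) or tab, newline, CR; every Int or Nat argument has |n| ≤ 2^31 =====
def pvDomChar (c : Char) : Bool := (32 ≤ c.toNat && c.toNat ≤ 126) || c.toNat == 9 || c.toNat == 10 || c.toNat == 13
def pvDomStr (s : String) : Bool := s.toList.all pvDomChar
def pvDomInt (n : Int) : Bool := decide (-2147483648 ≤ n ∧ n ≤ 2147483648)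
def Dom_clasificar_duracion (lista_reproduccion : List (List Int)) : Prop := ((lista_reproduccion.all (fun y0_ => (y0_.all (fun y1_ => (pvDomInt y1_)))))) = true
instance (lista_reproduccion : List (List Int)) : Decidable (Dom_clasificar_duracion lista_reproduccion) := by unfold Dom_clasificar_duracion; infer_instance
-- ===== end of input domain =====

-- B replaces A's per-song three-way branch on a dict with sorting the durations and two
-- binary-search boundary lookups (bisect_left 180 / bisect_right 300); same result, not faster.


-- ===== PORT A =====
-- song[3] is ported as pyGetD song 3 0; Pre_ guarantees the index is in range (Python raises otherwise).
def clasificar_duracion (lista_reproduccion : List (List Int)) : List (String × Int) :=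
  (lista_reproduccion.foldl
    (fun duration_count song =>
      let duration := PySem.List.pyGetD song 3 0
      if duration < 180 then
        PySem.Dict.insert duration_count "a" (PySem.Dict.getD duration_count "a" 0 + 1)
      else if 180 ≤ duration ∧ duration ≤ 300 then
        PySem.Dict.insert duration_count "b" (PySem.Dict.getD duration_count "b" 0 + 1)
      else
        PySem.Dict.insert duration_count "c" (PySem.Dict.getD duration_count "c" 0 + 1))
    (PySem.Dict.mk [("a", 0), ("b", 0), ("c", 0)] : PySem.Dict String Int)).items

-- ===== PORT B =====
def clasificar_duracion_alt (lista_reproduccion : List (List Int)) : List (String × Int) :=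
  let ds := PySem.List.sorted (lista_reproduccion.map (fun song => PySem.List.pyGetD song 3 0)) (fun x => x) false
  let a := PySem.List.bisectLeft ds 180
  let upto300 := PySem.List.bisectRight ds 300
  [("a", (a : Int)), ("b", (upto300 : Int) - (a : Int)), ("c", (ds.length : Int) - (upto300 : Int))]

-- ===== PRECONDITION & SPEC =====
-- Pre_ excludes exactly the inputs where Python A raises IndexError: a song with fewer than 4 fields.
def Pre_clasificar_duracion (lista_reproduccion : List (List Int)) : Prop :=
  ∀ song ∈ lista_reproduccion, 4 ≤ song.length
instance (lista_reproduccion : List (List Int)) : Decidable (Pre_clasificar_duracion lista_reproduccion) := by unfold Pre_clasificar_duracion; infer_instance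
def pvWitness_clasificar_duracion : List (List Int) := [[0, 1, 2, 150], [3, 4, 5, 200], [6, 7, 8, 400]]

def Spec_clasificar_duracion (lista_reproduccion : List (List Int)) (out : List (String × Int)) : Prop := out = clasificar_duracion_alt lista_reproduccion
instance (lista_reproduccion : List (List Int)) (out : List (String × Int)) : Decidable (Spec_clasificar_duracion lista_reproduccion out) := by unfold Spec_clasificar_duracion; infer_instance

-- ===== CLAIM (what is proved, stated in full; the proofs are below) =====
def Claim_equal_clasificar_duracion : Prop := ∀ (lista_reproduccion : List (List Int)), Dom_clasificar_duracion lista_reproduccion → Pre_clasificar_duracion lista_reproduccion → Spec_clasificar_duracion lista_reproduccion (clasificar_duracion lista_reproduccion)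

-- ===== LEMMAS AND PROOFS =====

-- a countP whose true region is exactly an initial segment of the list
theorem pv_countP_eq_of_split (p : Int → Bool) (xs : List Int) (k : Nat) (hk : k ≤ xs.length)
    (h1 : ∀ (j : Nat) (hj : j < xs.length), j < k → p xs[j])
    (h2 : ∀ (j : Nat) (hj : j < xs.length), k ≤ j → ¬ p xs[j]) :
    xs.countP p = k := by
  rw [← List.take_append_drop k xs, List.countP_append]
  have t1 : (xs.take k).countP p = (xs.take k).length := by
    apply List.countP_eq_length.mpr
    intro a ha
    rw [List.mem_iff_getElem] at ha
    obtain ⟨j, hj, rfl⟩ := ha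
    have hjk : j < k := by simp [List.length_take] at hj; omega
    have hj' : j < xs.length := lt_of_lt_of_le hjk hk
    rw [List.getElem_take]
    exact h1 j hj' hjk
  have t2 : (xs.drop k).countP p = 0 := by
    apply List.countP_eq_zero.mpr
    intro a ha
    rw [List.mem_iff_getElem] at ha
    obtain ⟨j, hj, rfl⟩ := ha
    have hj' : k + j < xs.length := by simpa [Nat.lt_sub_iff_add_lt'] using hj
    rw [List.getElem_drop]
    exact h2 (k + j) hj' (Nat.le_add_right _ _)
  rw [t1, t2, List.length_take]
  omega

theorem pv_bisectLeft_eq_countP (xs : List Int) (x : Int) (h : xs.Pairwise (· ≤ ·)) :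
    PySem.List.bisectLeft xs x = xs.countP (fun d => decide (d < x)) := by
  obtain ⟨hk, h1, h2⟩ := PySem.List.bisectLeft_spec xs x h
  exact (pv_countP_eq_of_split _ xs _ hk (fun j hj hlt => by simpa using h1 j hj hlt)
    (fun j hj hge => by simpa using h2 j hj hge)).symm

theorem pv_bisectRight_eq_countP (xs : List Int) (x : Int) (h : xs.Pairwise (· ≤ ·)) :
    PySem.List.bisectRight xs x = xs.countP (fun d => decide (d ≤ x)) := by
  obtain ⟨hk, h1, h2⟩ := PySem.List.bisectRight_spec xs x h
  exact (pv_countP_eq_of_split _ xs _ hk (fun j hj hlt => by simpa using h1 j hj hlt)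
    (fun j hj hge => by simpa using h2 j hj hge)).symm

-- A's loop, with symbolic counters
theorem pv_foldA_eq (l : List (List Int)) (x y z : Int) :
    l.foldl
      (fun duration_count song =>
        let duration := PySem.List.pyGetD song 3 0
        if duration < 180 then
          PySem.Dict.insert duration_count "a" (PySem.Dict.getD duration_count "a" 0 + 1)
        else if 180 ≤ duration ∧ duration ≤ 300 then
          PySem.Dict.insert duration_count "b" (PySem.Dict.getD duration_count "b" 0 + 1)
        else
          PySem.Dict.insert duration_count "c" (PySem.Dict.getD duration_count "c" 0 + 1))
      (PySem.Dict.mk [("a", x), ("b", y), ("c", z)])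
    = PySem.Dict.mk [("a", x + (l.countP (fun s => decide (PySem.List.pyGetD s 3 0 < 180)) : Int)),
       ("b", y + (l.countP (fun s => decide (180 ≤ PySem.List.pyGetD s 3 0 ∧ PySem.List.pyGetD s 3 0 ≤ 300)) : Int)),
       ("c", z + (l.countP (fun s => decide (300 < PySem.List.pyGetD s 3 0)) : Int))] := by
  induction l generalizing x y z with
  | nil => simp
  | cons s t ih =>
    simp only [List.foldl_cons, List.countP_cons]
    by_cases hA : PySem.List.pyGetD s 3 0 < 180
    · rw [show ((if PySem.List.pyGetD s 3 0 < 180 then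
          PySem.Dict.insert (PySem.Dict.mk [("a", x), ("b", y), ("c", z)]) "a" (PySem.Dict.getD (PySem.Dict.mk [("a", x), ("b", y), ("c", z)]) "a" 0 + 1)
        else if 180 ≤ PySem.List.pyGetD s 3 0 ∧ PySem.List.pyGetD s 3 0 ≤ 300 then
          PySem.Dict.insert (PySem.Dict.mk [("a", x), ("b", y), ("c", z)]) "b" (PySem.Dict.getD (PySem.Dict.mk [("a", x), ("b", y), ("c", z)]) "b" 0 + 1)
        else
          PySem.Dict.insert (PySem.Dict.mk [("a", x), ("b", y), ("c", z)]) "c" (PySem.Dict.getD (PySem.Dict.mk [("a", x), ("b", y), ("c", z)]) "c" 0 + 1))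
        = PySem.Dict.mk [("a", x + 1), ("b", y), ("c", z)]) from by
        simp [hA, PySem.Dict.insert, PySem.Dict.getD, PySem.Dict.get?]]
      rw [ih]
      have : ¬ (180 ≤ PySem.List.pyGetD s 3 0 ∧ PySem.List.pyGetD s 3 0 ≤ 300) := by omega
      have h3 : ¬ (300 < PySem.List.pyGetD s 3 0) := by omega
      simp [hA, this, h3]
      ring
    · by_cases hB : 180 ≤ PySem.List.pyGetD s 3 0 ∧ PySem.List.pyGetD s 3 0 ≤ 300
      · rw [show ((if PySem.List.pyGetD s 3 0 < 180 then
            PySem.Dict.insert (PySem.Dict.mk [("a", x), ("b", y), ("c", z)]) "a" (PySem.Dict.getD (PySem.Dict.mk [("a", x), ("b", y), ("c", z)]) "a" 0 + 1)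
          else if 180 ≤ PySem.List.pyGetD s 3 0 ∧ PySem.List.pyGetD s 3 0 ≤ 300 then
            PySem.Dict.insert (PySem.Dict.mk [("a", x), ("b", y), ("c", z)]) "b" (PySem.Dict.getD (PySem.Dict.mk [("a", x), ("b", y), ("c", z)]) "b" 0 + 1)
          else
            PySem.Dict.insert (PySem.Dict.mk [("a", x), ("b", y), ("c", z)]) "c" (PySem.Dict.getD (PySem.Dict.mk [("a", x), ("b", y), ("c", z)]) "c" 0 + 1))
          = PySem.Dict.mk [("a", x), ("b", y + 1), ("c", z)]) from by
          simp [show ¬ (PySem.List.pyGetD s 3 0 < 180) from by omega, hB,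
            PySem.Dict.insert, PySem.Dict.getD, PySem.Dict.get?]]
        rw [ih]
        have h3 : ¬ (300 < PySem.List.pyGetD s 3 0) := by omega
        simp [hA, hB, h3]
        ring
      · rw [show ((if PySem.List.pyGetD s 3 0 < 180 then
            PySem.Dict.insert (PySem.Dict.mk [("a", x), ("b", y), ("c", z)]) "a" (PySem.Dict.getD (PySem.Dict.mk [("a", x), ("b", y), ("c", z)]) "a" 0 + 1)
          else if 180 ≤ PySem.List.pyGetD s 3 0 ∧ PySem.List.pyGetD s 3 0 ≤ 300 then
            PySem.Dict.insert (PySem.Dict.mk [("a", x), ("b", y), ("c", z)]) "b" (PySem.Dict.getD (PySem.Dict.mk [("a", x), ("b", y), ("c", z)]) "b" 0 + 1)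
          else
            PySem.Dict.insert (PySem.Dict.mk [("a", x), ("b", y), ("c", z)]) "c" (PySem.Dict.getD (PySem.Dict.mk [("a", x), ("b", y), ("c", z)]) "c" 0 + 1))
          = PySem.Dict.mk [("a", x), ("b", y), ("c", z + 1)]) from by
          simp [show ¬ (PySem.List.pyGetD s 3 0 < 180) from by omega,
            show ¬ (180 ≤ PySem.List.pyGetD s 3 0 ∧ PySem.List.pyGetD s 3 0 ≤ 300) from by omega,
            PySem.Dict.insert, PySem.Dict.getD, PySem.Dict.get?]]
        rw [ih]
        have h3 : 300 < PySem.List.pyGetD s 3 0 := by omega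
        simp [hA, hB, h3]
        ring

-- arithmetic relating the three bucket counts to the two boundary counts
theorem pv_counts_arith (ds : List Int) :
    (ds.countP (fun d => decide (180 ≤ d ∧ d ≤ 300)) : Int)
        = (ds.countP (fun d => decide (d ≤ 300)) : Int) - (ds.countP (fun d => decide (d < 180)) : Int)
    ∧ (ds.countP (fun d => decide (300 < d)) : Int)
        = (ds.length : Int) - (ds.countP (fun d => decide (d ≤ 300)) : Int) := by
  induction ds with
  | nil => simp
  | cons d t ih =>
    simp only [List.countP_cons, List.length_cons]
    by_cases h1 : d < 180 <;> by_cases h2 : d ≤ 300 <;>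
      simp [h1, h2] <;> simp only [Bool.decide_and] at * <;> omega

-- ===== VERDICT (by name: the statement is the Claim_ definition above) =====
theorem clasificar_duracion_spec : Claim_equal_clasificar_duracion := by
  intro l _ _
  unfold Spec_clasificar_duracion
  simp only [clasificar_duracion, clasificar_duracion_alt]
  have hpw : (PySem.List.sorted (l.map (fun song => PySem.List.pyGetD song 3 0)) (fun x => x) false).Pairwise (· ≤ ·) := by
    simpa using PySem.List.sorted_pairwise (l.map (fun song => PySem.List.pyGetD song 3 0)) (fun x => x)
  have hperm := PySem.List.sorted_perm (l.map (fun song => PySem.List.pyGetD song 3 0)) (fun x => x) false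
  have hL := pv_bisectLeft_eq_countP _ 180 hpw
  have hR := pv_bisectRight_eq_countP _ 300 hpw
  obtain ⟨e1, e2⟩ := pv_counts_arith (l.map (fun song => PySem.List.pyGetD song 3 0))
  rw [pv_foldA_eq]
  simp only [hL, hR, hperm.countP_eq, hperm.length_eq, List.countP_map, List.length_map] at *
  simp only [Function.comp_def, Bool.decide_and] at e1 e2 ⊢
  simp only [List.cons.injEq, Prod.mk.injEq, and_true, true_and]
  refine ⟨by omega, by omega, by omega⟩
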